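-- pv_equiv track=rewrite | github.com/mpearso3/AdventOfCode | 2024/Day_9/main.py | get_block_size
-- ===== SOURCE A (Python) =====
-- def get_block_size(compressed_blocks, id):
--     size = 0
--
--     found_id = False
--     for i in range(len(compressed_blocks) - 1, -1, -1):
--         if compressed_blocks[i] == id:
--             found_id = True
--             size += 1
--         else:
--             if found_id:
--                 break
--
--     return size
-- ===== SOURCE B (Python) =====
-- def _runs(xs):
--     # forward run-length grouping: [(value, run_length), ...]
--     out = []
--     for x in xs:
--         if out and out[-1][0] == x:
--             out[-1] = (x, out[-1][1] + 1)
--         else: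
--             out.append((x, 1))
--     return out
--
--
-- def get_block_size(compressed_blocks, id):
--     size = 0
--     for key, run_len in _runs(compressed_blocks):
--         if key == id:
--             size = run_len
--     return size
-- ===== Notes on version B (the rewrite author's own statement) =====
-- stated objective: alternative
-- what changed: Replaces A's backward index scan with a found/break flag by a forward run-length grouping pass whose last id-keyed run overwrites the answer.
import Mathlib
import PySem

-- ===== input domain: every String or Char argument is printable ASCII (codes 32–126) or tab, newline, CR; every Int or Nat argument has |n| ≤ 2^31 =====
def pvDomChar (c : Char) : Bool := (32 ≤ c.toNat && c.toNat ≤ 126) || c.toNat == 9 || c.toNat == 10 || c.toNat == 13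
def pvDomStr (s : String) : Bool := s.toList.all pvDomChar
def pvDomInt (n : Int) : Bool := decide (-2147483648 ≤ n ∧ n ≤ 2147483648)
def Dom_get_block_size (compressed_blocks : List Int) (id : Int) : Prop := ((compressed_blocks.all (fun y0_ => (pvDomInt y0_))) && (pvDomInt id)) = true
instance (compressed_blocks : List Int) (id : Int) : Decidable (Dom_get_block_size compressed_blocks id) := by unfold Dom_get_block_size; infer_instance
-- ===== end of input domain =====

-- B replaces A's backward index scan (found_id flag + break) by a forward run-length grouping pass (alternative, same cost).

-- ===== PORT A =====
-- A iterates i = len-1 .. 0 over indices, i.e. over the reversed list; state (size, found_id),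
-- break on the first non-id element after an id was found.
def gbsLoopA (id : Int) : List Int → Int → Bool → Int
  | [], size, _ => size
  | x :: rest, size, found =>
    if x = id then gbsLoopA id rest (size + 1) true
    else if found then size else gbsLoopA id rest size found

def get_block_size (compressed_blocks : List Int) (id : Int) : Int :=
  gbsLoopA id compressed_blocks.reverse 0 false

-- ===== PORT B =====
-- _runs' loop body: merge x into the last run ("out[-1] = (x, out[-1][1]+1)") or append a new run
-- ("out.append((x,1))"); replacing the last element is recursion to the end of the runs list.
def snocRun : List (Int × Int) → Int → List (Int × Int)
  | [], x => [(x, 1)]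
  | [(y, n)], x => if x = y then [(y, n + 1)] else [(y, n), (x, 1)]
  | p :: q :: rs, x => p :: snocRun (q :: rs) x

def get_block_size_alt (compressed_blocks : List Int) (id : Int) : Int :=
  (compressed_blocks.foldl snocRun []).foldl
    (fun size p => if p.1 = id then p.2 else size) 0

-- ===== PRECONDITION & SPEC =====
def Spec_get_block_size (compressed_blocks : List Int) (id : Int) (out : Int) : Prop := out = get_block_size_alt compressed_blocks id
instance (compressed_blocks : List Int) (id : Int) (out : Int) : Decidable (Spec_get_block_size compressed_blocks id out) := by unfold Spec_get_block_size; infer_instance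

-- ===== CLAIM (what is proved, stated in full; the proofs are below) =====
def Claim_equal_get_block_size : Prop := ∀ (compressed_blocks : List Int) (id : Int), Dom_get_block_size compressed_blocks id → Spec_get_block_size compressed_blocks id (get_block_size compressed_blocks id)

-- ===== LEMMAS AND PROOFS =====

-- length of the leading run of `id`
def leadC (id : Int) : List Int → Int
  | [] => 0
  | x :: xs => if x = id then 1 + leadC id xs else 0

-- length of the first contiguous run of `id` (0 if absent)
def fr (id : Int) : List Int → Int
  | [] => 0
  | x :: xs => if x = id then 1 + leadC id xs else fr id xs

-- length of the first id-keyed run in a runs list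
def firstG (id : Int) : List (Int × Int) → Int
  | [] => 0
  | (y, n) :: rs => if y = id then n else firstG id rs

-- run-length encoding by right recursion (reference form of port B's left fold)
def runsR : List Int → List (Int × Int)
  | [] => []
  | x :: xs =>
    match runsR xs with
    | [] => [(x, 1)]
    | (y, n) :: rest => if x = y then (y, n + 1) :: rest else (x, 1) :: (y, n) :: rest

-- one cons step of runsR, as a function
def consStep (x : Int) : List (Int × Int) → List (Int × Int)
  | [] => [(x, 1)]
  | (y, n) :: rest => if x = y then (y, n + 1) :: rest else (x, 1) :: (y, n) :: rest

lemma runsR_cons (x : Int) (xs : List Int) : runsR (x :: xs) = consStep x (runsR xs) := by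
  cases h : runsR xs with
  | nil => simp [runsR, consStep, h]
  | cons p rest => rcases p with ⟨y, n⟩; simp [runsR, consStep, h]

-- ---- A-side characterisation ----
lemma gbsLoopA_true (id : Int) : ∀ (l : List Int) (s : Int), gbsLoopA id l s true = s + leadC id l := by
  intro l
  induction l with
  | nil => intro s; simp [gbsLoopA, leadC]
  | cons x xs ih =>
    intro s
    by_cases h : x = id <;> simp [gbsLoopA, leadC, h, ih] <;> try ring

lemma gbsLoopA_false (id : Int) : ∀ (l : List Int) (s : Int), gbsLoopA id l s false = s + fr id l := by
  intro l
  induction l with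
  | nil => intro s; simp [gbsLoopA, fr]
  | cons x xs ih =>
    intro s
    by_cases h : x = id
    · simp [gbsLoopA, fr, h, gbsLoopA_true]; ring
    · simp [gbsLoopA, fr, h, ih]

-- ---- runsR facts ----
lemma runsR_cons_head (x : Int) (xs : List Int) : ∃ n r, runsR (x :: xs) = (x, n) :: r := by
  cases h : runsR xs with
  | nil => exact ⟨1, [], by simp [runsR, h]⟩
  | cons p rest =>
    rcases p with ⟨y, n⟩
    by_cases hxy : x = y
    · exact ⟨n + 1, rest, by simp [runsR, h, hxy]⟩
    · exact ⟨1, (y, n) :: rest, by simp [runsR, h, hxy]⟩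

lemma runsR_nil_iff (xs : List Int) : runsR xs = [] ↔ xs = [] := by
  cases xs with
  | nil => simp [runsR]
  | cons x t =>
    obtain ⟨n, r, h⟩ := runsR_cons_head x t
    simp [h]

lemma runsR_head (xs : List Int) (y : Int) (n : Int) (r : List (Int × Int))
    (h : runsR xs = (y, n) :: r) : ∃ t, xs = y :: t := by
  cases xs with
  | nil => simp [runsR] at h
  | cons a t =>
    obtain ⟨n', r', h'⟩ := runsR_cons_head a t
    rw [h'] at h
    simp at h
    exact ⟨t, by rw [h.1.1]⟩

lemma leadC_of_runsR : ∀ (xs : List Int) (y : Int) (n : Int) (r : List (Int × Int)),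
    runsR xs = (y, n) :: r → leadC y xs = n := by
  intro xs
  induction xs with
  | nil => intro y n r h; simp [runsR] at h
  | cons z zs ih =>
    intro y n r h
    cases hz : runsR zs with
    | nil =>
      have hzs : zs = [] := (runsR_nil_iff zs).mp hz
      subst hzs
      simp [runsR] at h
      obtain ⟨⟨hy, hn⟩, -⟩ := h
      subst hy
      rw [← hn]
      simp [leadC]
    | cons p rest =>
      rcases p with ⟨w, m⟩
      rw [runsR, hz] at h
      by_cases hzw : z = w
      · subst hzw
        simp at h
        obtain ⟨⟨hy, hn⟩, -⟩ := h
        have hm := ih z m rest hz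
        subst hy
        rw [← hn]
        simp [leadC, hm]
        ring
      · simp [hzw] at h
        obtain ⟨⟨hy, hn⟩, -⟩ := h
        obtain ⟨t, ht⟩ := runsR_head zs w m rest hz
        subst ht
        subst hy
        rw [← hn]
        simp [leadC, show ¬ w = z from fun h' => hzw h'.symm]

lemma firstG_runsR (id : Int) : ∀ (m : List Int), firstG id (runsR m) = fr id m := by
  intro m
  induction m with
  | nil => simp [runsR, firstG, fr]
  | cons x xs ih =>
    cases hx : runsR xs with
    | nil =>
      have hxs : xs = [] := (runsR_nil_iff xs).mp hx
      subst hxs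
      simp [runsR, firstG, fr, leadC]
    | cons p rest =>
      rcases p with ⟨y, n⟩
      rw [runsR, hx]
      by_cases hxy : x = y
      · subst hxy
        simp only [if_true]
        by_cases hid : x = id
        · have hlead : leadC x xs = n := leadC_of_runsR xs x n rest hx
          subst hid
          simp [firstG, fr, hlead]
          ring
        · have h1 : fr id (x :: xs) = fr id xs := by simp [fr, hid]
          rw [h1, ← ih, hx]
          simp [firstG, hid]
      · simp only [if_neg hxy]
        by_cases hid : x = id
        · obtain ⟨t, ht⟩ := runsR_head xs y n rest hx
          subst ht
          have hyid : ¬ (y = id) := fun h => hxy (hid.trans h.symm)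
          simp [firstG, fr, leadC, hid, hyid]
        · have h1 : fr id (x :: xs) = fr id xs := by simp [fr, hid]
          rw [h1, ← ih, hx]
          simp [firstG, hid]

-- ---- port B's left fold equals runsR ----
lemma consStep_snocRun : ∀ (rs : List (Int × Int)) (y x : Int),
    consStep y (snocRun rs x) = snocRun (consStep y rs) x := by
  intro rs
  match rs with
  | [] =>
    intro y x
    by_cases h : y = x <;> by_cases h' : x = y <;> simp_all [consStep, snocRun]
  | [(w, m)] =>
    intro y x
    by_cases hxw : x = w <;> by_cases hyw : y = w <;>
      simp [consStep, snocRun, hxw, hyw]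
  | (w, m) :: q :: t =>
    intro y x
    by_cases hyw : y = w <;> simp [consStep, snocRun, hyw]

lemma runsR_snoc : ∀ (m : List Int) (x : Int), runsR (m ++ [x]) = snocRun (runsR m) x := by
  intro m
  induction m with
  | nil => intro x; simp [runsR, snocRun]
  | cons y ys ih =>
    intro x
    rw [List.cons_append, runsR_cons, ih, consStep_snocRun, ← runsR_cons]

lemma foldl_snocRun_eq_runsR (l : List Int) : l.foldl snocRun [] = runsR l := by
  induction l using List.reverseRecOn with
  | nil => simp [runsR]
  | append_singleton t x ih => rw [List.foldl_append, List.foldl_cons, List.foldl_nil, ih, runsR_snoc]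

-- ---- reversal ----
lemma snocRun_append_last : ∀ (t : List (Int × Int)) (w m x : Int),
    snocRun (t ++ [(w, m)]) x = if x = w then t ++ [(w, m + 1)] else t ++ [(w, m), (x, 1)] := by
  intro t
  induction t with
  | nil => intro w m x; simp [snocRun]
  | cons p t' ih =>
    intro w m x
    cases t' with
    | nil => rcases p with ⟨a, b⟩; simp [snocRun]; split_ifs <;> simp
    | cons q t'' =>
      rcases p with ⟨a, b⟩
      simp only [List.cons_append] at ih ⊢
      rw [show snocRun ((a, b) :: q :: (t'' ++ [(w, m)])) x
            = (a, b) :: snocRun (q :: (t'' ++ [(w, m)])) x from rfl, ih]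
      split_ifs <;> simp

lemma snocRun_reverse (rs : List (Int × Int)) (x : Int) :
    snocRun rs.reverse x = (consStep x rs).reverse := by
  cases rs with
  | nil => simp [snocRun, consStep]
  | cons p r =>
    rcases p with ⟨w, m⟩
    rw [List.reverse_cons, snocRun_append_last]
    by_cases h : x = w <;> simp [consStep, h]

lemma runsR_reverse (l : List Int) : runsR l.reverse = (runsR l).reverse := by
  induction l with
  | nil => simp [runsR]
  | cons x l ih =>
    rw [List.reverse_cons, runsR_snoc, ih, snocRun_reverse, ← runsR_cons]

-- ---- last-wins fold = first match in reverse ----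
lemma foldl_pick_eq_firstG_reverse (id : Int) (rs : List (Int × Int)) :
    rs.foldl (fun size p => if p.1 = id then p.2 else size) 0 = firstG id rs.reverse := by
  induction rs using List.reverseRecOn with
  | nil => simp [firstG]
  | append_singleton t p ih =>
    rcases p with ⟨y, n⟩
    rw [List.foldl_append, List.foldl_cons, List.foldl_nil, List.reverse_append]
    by_cases h : y = id <;> simp [firstG, h, ih]

-- ===== VERDICT (by name: the statement is the Claim_ definition above) =====
theorem get_block_size_spec : Claim_equal_get_block_size := by
  intro cb id _
  unfold Spec_get_block_size get_block_size get_block_size_alt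
  rw [gbsLoopA_false, foldl_snocRun_eq_runsR, foldl_pick_eq_firstG_reverse,
    ← runsR_reverse, firstG_runsR]
  simp
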